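-- pv_equiv track=rewrite | github.com/Ceciliesolj/Airport_Simulator | plane_bad_weather.py | edit_snow_lists
-- ===== SOURCE A (Python) =====
-- def edit_snow_lists(list):
--     one = 0
--     two = 0
--     three = 0
--     four = 0
--     five = 0
--     for i in list:
--         if i < 60*60:
--             one += 1
--         elif 60*60 <= i < 60*60*2:
--             two += 1
--         elif 60*60*2 <= i < 60*60*3:
--             three += 1
--         elif 60*60*3 <= i < 60*60*4:
--             four += 1
--         else:
--             five += 1
--     new_list = [one, two, three, four, five]
--     return new_list
-- ===== SOURCE B (Python) =====
-- def edit_snow_lists(list):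
--     # Staged cumulative-threshold counting: count how many values fall below each
--     # hour boundary, then recover the per-bucket counts as differences.
--     below = [sum(1 for i in list if i < b) for b in (3600, 7200, 10800, 14400)]
--     n = len(list)
--     return [below[0], below[1] - below[0], below[2] - below[1],
--             below[3] - below[2], n - below[3]]
-- ===== Notes on version B (the rewrite author's own statement) =====
-- stated objective: alternative
-- what changed: Replaces the single-pass five-counter if/elif ladder with staged cumulative counting: one threshold count per hour boundary (how many values are below it), then the bucket counts are recovered as differences of consecutive cumulative counts.
import Mathlib
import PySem

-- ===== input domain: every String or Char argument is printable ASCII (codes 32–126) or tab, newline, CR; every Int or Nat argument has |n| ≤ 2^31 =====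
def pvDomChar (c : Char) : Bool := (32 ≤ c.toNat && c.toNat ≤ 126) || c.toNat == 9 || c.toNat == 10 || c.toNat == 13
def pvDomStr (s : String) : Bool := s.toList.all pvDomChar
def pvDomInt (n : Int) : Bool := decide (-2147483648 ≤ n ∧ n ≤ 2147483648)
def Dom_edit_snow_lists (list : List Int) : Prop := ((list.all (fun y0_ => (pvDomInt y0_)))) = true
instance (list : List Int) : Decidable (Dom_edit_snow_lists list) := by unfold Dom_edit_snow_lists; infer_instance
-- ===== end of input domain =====

-- ===== PORT A =====
-- Header: B replaces A's single-pass five-counter if/elif ladder with staged cumulative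
-- threshold counts whose differences are the bucket counts (alternative decomposition).
def edit_snow_lists_loop (l : List Int) (one two three four five : Int) : Int × Int × Int × Int × Int :=
  match l with
  | [] => (one, two, three, four, five)
  | i :: rest =>
    if i < 60*60 then edit_snow_lists_loop rest (one + 1) two three four five
    else if 60*60 ≤ i ∧ i < 60*60*2 then edit_snow_lists_loop rest one (two + 1) three four five
    else if 60*60*2 ≤ i ∧ i < 60*60*3 then edit_snow_lists_loop rest one two (three + 1) four five
    else if 60*60*3 ≤ i ∧ i < 60*60*4 then edit_snow_lists_loop rest one two three (four + 1) five
    else edit_snow_lists_loop rest one two three four (five + 1)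

def edit_snow_lists (list : List Int) : List Int :=
  match edit_snow_lists_loop list 0 0 0 0 0 with
  | (one, two, three, four, five) => [one, two, three, four, five]

-- ===== PORT B =====
-- sum(1 for i in list if i < b): a fold accumulating 1 per element below the threshold.
def pvCountBelow (l : List Int) (b : Int) : Int :=
  l.foldl (fun acc i => if i < b then acc + 1 else acc) 0

def edit_snow_lists_alt (list : List Int) : List Int :=
  let below := [(3600 : Int), 7200, 10800, 14400].map (pvCountBelow list)
  let n : Int := list.length
  [below[0]!, below[1]! - below[0]!, below[2]! - below[1]!,
   below[3]! - below[2]!, n - below[3]!]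

-- ===== PRECONDITION & SPEC =====
def Spec_edit_snow_lists (list : List Int) (out : List Int) : Prop := out = edit_snow_lists_alt list
instance (list : List Int) (out : List Int) : Decidable (Spec_edit_snow_lists list out) := by unfold Spec_edit_snow_lists; infer_instance

-- ===== CLAIM (what is proved, stated in full; the proofs are below) =====
def Claim_equal_edit_snow_lists : Prop := ∀ (list : List Int), Dom_edit_snow_lists list → Spec_edit_snow_lists list (edit_snow_lists list)

-- ===== LEMMAS AND PROOFS =====
lemma pvCountBelow_shift (b : Int) (l : List Int) : ∀ a : Int,
    l.foldl (fun acc i => if i < b then acc + 1 else acc) a =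
      a + l.foldl (fun acc i => if i < b then acc + 1 else acc) 0 := by
  induction l with
  | nil => intro a; simp
  | cons i rest ih =>
    intro a
    simp only [List.foldl_cons]
    rw [ih, ih (if i < b then 0 + 1 else 0)]
    split_ifs <;> omega

lemma pvCountBelow_cons (b i : Int) (rest : List Int) :
    pvCountBelow (i :: rest) b = (if i < b then 1 else 0) + pvCountBelow rest b := by
  simp only [pvCountBelow, List.foldl_cons]
  rw [pvCountBelow_shift]
  split_ifs <;> omega

lemma loop_eq (l : List Int) : ∀ a b c d e : Int,
    edit_snow_lists_loop l a b c d e =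
      (a + pvCountBelow l 3600,
       b + (pvCountBelow l 7200 - pvCountBelow l 3600),
       c + (pvCountBelow l 10800 - pvCountBelow l 7200),
       d + (pvCountBelow l 14400 - pvCountBelow l 10800),
       e + ((l.length : Int) - pvCountBelow l 14400)) := by
  induction l with
  | nil => intro a b c d e; simp [edit_snow_lists_loop, pvCountBelow]
  | cons i rest ih =>
    intro a b c d e
    unfold edit_snow_lists_loop
    simp only [pvCountBelow_cons, ih, List.length_cons]
    push_cast
    split_ifs <;> (simp only [Prod.mk.injEq]; refine ⟨?_, ?_, ?_, ?_, ?_⟩ <;> omega)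

theorem edit_snow_lists_spec : Claim_equal_edit_snow_lists := by
  intro l _
  unfold Spec_edit_snow_lists edit_snow_lists edit_snow_lists_alt
  rw [loop_eq]
  simp
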